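-- pv_equiv track=rewrite | github.com/mikedasquirrel/narratio | data_collection/nhl_data_builder_full_history.py | _is_rivalry
-- ===== SOURCE A (Python) =====
-- ORIGINAL_SIX = ['BOS', 'CHI', 'DET', 'MTL', 'NYR', 'TOR']
--
-- def _is_rivalry(team1: str, team2: str) -> bool:
--     """Check if rivalry game"""
--     if team1 in ORIGINAL_SIX and team2 in ORIGINAL_SIX:
--         return True
--
--     rivalries = [
--         ('BOS', 'MTL'), ('TOR', 'MTL'), ('TOR', 'OTT'),
--         ('EDM', 'CGY'), ('NYR', 'NYI'), ('NYR', 'NJD'),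
--         ('PIT', 'PHI'), ('CHI', 'DET'), ('LAK', 'ANA'),
--     ]
--
--     for r1, r2 in rivalries:
--         if (team1, team2) in [(r1, r2), (r2, r1)]:
--             return True
--
--     return False
-- ===== SOURCE B (Python) =====
-- ORIGINAL_SIX = ['BOS', 'CHI', 'DET', 'MTL', 'NYR', 'TOR']
--
-- # Precomputed symmetric lookup table: every (unordered, possibly degenerate) pair of
-- # Original Six teams, plus each explicit rivalry pair, as frozensets.
-- _RIVALRY_SET = (
--     {frozenset((a, b)) for a in ORIGINAL_SIX for b in ORIGINAL_SIX}
--     | {frozenset(p) for p in (('BOS', 'MTL'), ('TOR', 'MTL'), ('TOR', 'OTT'),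
--                               ('EDM', 'CGY'), ('NYR', 'NYI'), ('NYR', 'NJD'),
--                               ('PIT', 'PHI'), ('CHI', 'DET'), ('LAK', 'ANA'))}
-- )
--
--
-- def _is_rivalry(team1: str, team2: str) -> bool:
--     """Check if rivalry game"""
--     return frozenset((team1, team2)) in _RIVALRY_SET
-- ===== Notes on version B (the rewrite author's own statement) =====
-- stated objective: simpler
-- what changed: Replaces A's Original-Six branch plus per-pair loop over ordered-tuple checks with a single symmetric membership test of frozenset((team1, team2)) in one precomputed module-level table of frozensets (all Original-Six unordered pairs incl. singleton self-pairs, plus the explicit rivalry pairs).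
import Mathlib
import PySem

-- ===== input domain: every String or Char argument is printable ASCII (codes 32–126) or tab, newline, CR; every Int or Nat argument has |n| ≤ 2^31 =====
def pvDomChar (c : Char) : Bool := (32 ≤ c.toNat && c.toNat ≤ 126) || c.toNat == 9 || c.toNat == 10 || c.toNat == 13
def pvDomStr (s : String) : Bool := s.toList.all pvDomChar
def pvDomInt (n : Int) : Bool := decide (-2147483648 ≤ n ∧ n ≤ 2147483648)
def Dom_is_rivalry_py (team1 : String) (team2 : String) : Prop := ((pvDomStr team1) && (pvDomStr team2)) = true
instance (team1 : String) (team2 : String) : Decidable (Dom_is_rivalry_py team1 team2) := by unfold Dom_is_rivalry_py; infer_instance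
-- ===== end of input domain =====

-- B replaces A's branch-plus-loop by one membership test in a precomputed symmetric
-- table of frozensets (simpler/idiomatic; same result on every input).

-- ===== PORT A =====
def pvOriginalSix : List String := ["BOS", "CHI", "DET", "MTL", "NYR", "TOR"]

def pvRivalries : List (String × String) :=
  [("BOS", "MTL"), ("TOR", "MTL"), ("TOR", "OTT"),
   ("EDM", "CGY"), ("NYR", "NYI"), ("NYR", "NJD"),
   ("PIT", "PHI"), ("CHI", "DET"), ("LAK", "ANA")]

-- literal transliteration of A: the membership branch, then the for-loop with early return
def is_rivalry_py (team1 : String) (team2 : String) : Bool :=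
  if pvOriginalSix.contains team1 && pvOriginalSix.contains team2 then
    true
  else
    pvRivalries.any (fun r => [(r.1, r.2), (r.2, r.1)].contains (team1, team2))

-- ===== PORT B =====
-- frozenset((a, b)) : a Python set of at most two strings
def pvFroz (a : String) (b : String) : PySem.Set String := PySem.Set.ofList [a, b]

-- the module-scope _RIVALRY_SET: kept as the list of its frozenset elements (Python's
-- outer set only dedups this table, which cannot change any membership answer);
-- membership compares elements by frozenset (set) equality, i.e. PySem.Set.equal
def pvRivalrySet : List (PySem.Set String) :=
  (pvOriginalSix.flatMap (fun a => pvOriginalSix.map (fun b => pvFroz a b)))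
  ++ pvRivalries.map (fun r => pvFroz r.1 r.2)

def is_rivalry_py_alt (team1 : String) (team2 : String) : Bool :=
  pvRivalrySet.any (fun s => PySem.Set.equal s (pvFroz team1 team2))

-- ===== PRECONDITION & SPEC =====
def Spec_is_rivalry_py (team1 : String) (team2 : String) (out : Bool) : Prop := out = is_rivalry_py_alt team1 team2
instance (team1 : String) (team2 : String) (out : Bool) : Decidable (Spec_is_rivalry_py team1 team2 out) := by unfold Spec_is_rivalry_py; infer_instance

-- ===== CLAIM (what is proved, stated in full; the proofs are below) =====
def Claim_equal_is_rivalry_py : Prop := ∀ (team1 : String) (team2 : String), Dom_is_rivalry_py team1 team2 → Spec_is_rivalry_py team1 team2 (is_rivalry_py team1 team2)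

-- ===== LEMMAS AND PROOFS =====

-- set equality of two 2-element frozensets, as a pure condition on the four strings
theorem pv_froz_equal (a b c d : String) :
    PySem.Set.equal (pvFroz a b) (pvFroz c d) = true ↔
      ((a = c ∨ a = d) ∧ (b = c ∨ b = d) ∧ (c = a ∨ c = b) ∧ (d = a ∨ d = b)) := by
  simp only [pvFroz, PySem.Set.equal_iff, PySem.Set.mem_ofList]
  constructor
  · intro h
    refine ⟨?_, ?_, ?_, ?_⟩
    · simpa using (h a).1 (by simp)
    · simpa using (h b).1 (by simp)
    · simpa using (h c).2 (by simp)
    · simpa using (h d).2 (by simp)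
  · rintro ⟨h1, h2, h3, h4⟩ x
    simp only [List.mem_cons, List.not_mem_nil, or_false]
    constructor
    · rintro (rfl | rfl) <;> assumption
    · rintro (rfl | rfl) <;> assumption

-- an explicit rivalry pair (r1 ≠ r2) matches as a frozenset iff it matches in one of the two orders
theorem pv_pair_match (r1 r2 t1 t2 : String) (h : r1 ≠ r2) :
    ((r1 = t1 ∨ r1 = t2) ∧ (r2 = t1 ∨ r2 = t2) ∧ (t1 = r1 ∨ t1 = r2) ∧ (t2 = r1 ∨ t2 = r2)) ↔
      ((t1 = r1 ∧ t2 = r2) ∨ (t1 = r2 ∧ t2 = r1)) := by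
  constructor
  · rintro ⟨h1, h2, h3, h4⟩
    rcases h1 with rfl | rfl <;> rcases h2 with rfl | rfl <;> tauto
  · rintro (⟨rfl, rfl⟩ | ⟨rfl, rfl⟩) <;> tauto

-- the Original-Six block of the table matches iff both teams are Original Six
theorem pv_six_match (t1 t2 : String) :
    (∃ a ∈ pvOriginalSix, ∃ b ∈ pvOriginalSix,
        PySem.Set.equal (pvFroz a b) (pvFroz t1 t2) = true) ↔
      (t1 ∈ pvOriginalSix ∧ t2 ∈ pvOriginalSix) := by
  constructor
  · rintro ⟨a, ha, b, hb, h⟩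
    rw [pv_froz_equal] at h
    obtain ⟨-, -, h3, h4⟩ := h
    constructor
    · rcases h3 with rfl | rfl <;> assumption
    · rcases h4 with rfl | rfl <;> assumption
  · rintro ⟨h1, h2⟩
    exact ⟨t1, h1, t2, h2, by rw [pv_froz_equal]; tauto⟩

-- r.1 ≠ r.2 for every explicit rivalry pair
theorem pv_riv_ne : ∀ r ∈ pvRivalries, r.1 ≠ r.2 := by decide

-- unfold B's membership test into the two blocks of the table
theorem pv_alt_iff (t1 t2 : String) :
    is_rivalry_py_alt t1 t2 = true ↔
      (∃ a ∈ pvOriginalSix, ∃ b ∈ pvOriginalSix,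
          PySem.Set.equal (pvFroz a b) (pvFroz t1 t2) = true) ∨
      (∃ r ∈ pvRivalries, PySem.Set.equal (pvFroz r.1 r.2) (pvFroz t1 t2) = true) := by
  simp only [is_rivalry_py_alt, pvRivalrySet, List.any_eq_true, List.mem_append,
    List.mem_flatMap, List.mem_map]
  constructor
  · rintro ⟨s, (⟨a, ha, b, hb, rfl⟩ | ⟨r, hr, rfl⟩), h⟩
    · exact Or.inl ⟨a, ha, b, hb, h⟩
    · exact Or.inr ⟨r, hr, h⟩
  · rintro (⟨a, ha, b, hb, h⟩ | ⟨r, hr, h⟩)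
    · exact ⟨_, Or.inl ⟨a, ha, b, hb, rfl⟩, h⟩
    · exact ⟨_, Or.inr ⟨r, hr, rfl⟩, h⟩

-- pointwise: A's two-order tuple test agrees with B's frozenset test, pair by pair
theorem pv_point (r : String × String) (hr : r ∈ pvRivalries) (t1 t2 : String) :
    ([(r.1, r.2), (r.2, r.1)].contains (t1, t2) = true) ↔
      PySem.Set.equal (pvFroz r.1 r.2) (pvFroz t1 t2) = true := by
  rw [pv_froz_equal, pv_pair_match _ _ _ _ (pv_riv_ne r hr)]
  simp only [List.contains_eq_mem, List.mem_cons, List.not_mem_nil, or_false,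
    decide_eq_true_eq, Prod.mk.injEq]

theorem pv_main (t1 t2 : String) : is_rivalry_py t1 t2 = is_rivalry_py_alt t1 t2 := by
  rw [Bool.eq_iff_iff, pv_alt_iff, pv_six_match]
  unfold is_rivalry_py
  by_cases hsix : (pvOriginalSix.contains t1 && pvOriginalSix.contains t2) = true
  · rw [if_pos hsix]
    simp only [Bool.and_eq_true, List.contains_iff_mem] at hsix
    simp [hsix]
  · rw [if_neg hsix]
    simp only [Bool.and_eq_true, List.contains_iff_mem, not_and_or] at hsix
    have hns : ¬ (t1 ∈ pvOriginalSix ∧ t2 ∈ pvOriginalSix) := by tauto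
    rw [List.any_eq_true]
    constructor
    · rintro ⟨r, hrm, h⟩
      exact Or.inr ⟨r, hrm, (pv_point r hrm t1 t2).1 h⟩
    · rintro (h | ⟨r, hrm, h⟩)
      · exact absurd h hns
      · exact ⟨r, hrm, (pv_point r hrm t1 t2).2 h⟩

-- ===== VERDICT (by name: the statement is the Claim_ definition above) =====
theorem is_rivalry_py_spec : Claim_equal_is_rivalry_py := by
  intro t1 t2 _
  unfold Spec_is_rivalry_py
  exact pv_main t1 t2
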